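-- pv_equiv track=rewrite | github.com/yccc61/Computer-Vision | assgn5NeuralNetworkForClassification/python/run_q5.py | cluster_bboxes
-- ===== SOURCE A (Python) =====
-- def sortColumn(coordinates):
--     #return minc
--     return coordinates[1]
--
-- def cluster_bboxes(bboxes, threshold):
--     clusters=[]
--     curr_cluster=[bboxes[0]]
--     result=[]
--     for i in range(1,len(bboxes)):
--         if abs(curr_cluster[-1][0]-bboxes[i][0])<=threshold:
--             curr_cluster.append(bboxes[i])
--         else:
--             clusters.append(curr_cluster)
--             curr_cluster=[bboxes[i]]
--     clusters.append(curr_cluster)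
--     for cluster in clusters:
--         result.append(sorted(cluster, key=sortColumn))
--     return result
-- ===== SOURCE B (Python) =====
-- def cluster_bboxes(bboxes, threshold):
--     n = len(bboxes)
--     cuts = [0] + [i for i in range(1, n) if abs(bboxes[i][0] - bboxes[i - 1][0]) > threshold] + [n]
--     return [sorted(bboxes[a:b], key=lambda c: c[1]) for a, b in zip(cuts, cuts[1:])]
-- ===== Notes on version B (the rewrite author's own statement) =====
-- stated objective: alternative
-- what changed: Replaces A's single stateful pass (mutable current-cluster and clusters accumulators) by a two-phase decomposition: first compute the boundary indices where the row gap exceeds the threshold, then slice the list at consecutive boundaries and sort each slice.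
import Mathlib
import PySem

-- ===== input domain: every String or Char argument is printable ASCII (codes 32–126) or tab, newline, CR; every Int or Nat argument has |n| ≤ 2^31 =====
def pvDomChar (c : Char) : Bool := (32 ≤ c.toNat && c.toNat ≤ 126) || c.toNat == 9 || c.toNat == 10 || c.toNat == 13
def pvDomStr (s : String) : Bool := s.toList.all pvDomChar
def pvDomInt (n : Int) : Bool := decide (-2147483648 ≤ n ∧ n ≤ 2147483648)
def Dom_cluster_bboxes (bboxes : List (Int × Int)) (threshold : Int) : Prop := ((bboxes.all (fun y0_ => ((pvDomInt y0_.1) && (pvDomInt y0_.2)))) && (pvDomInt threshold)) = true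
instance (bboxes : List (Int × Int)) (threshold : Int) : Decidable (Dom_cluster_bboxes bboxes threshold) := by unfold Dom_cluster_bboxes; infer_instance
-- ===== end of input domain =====

-- B replaces A's stateful single pass by a boundary-index pass followed by slicing and sorting (alternative decomposition, same cost); on the empty list A raises IndexError while B returns [[]].


-- ===== PORT A =====
-- literal port of A: one pass over indices 1..n-1; state = (clusters, curr_cluster);
-- curr_cluster[-1] via pyGetD; the [] branch is unreachable under Pre_ (Python raises IndexError at bboxes[0]).
def cluster_bboxes (bboxes : List (Int × Int)) (threshold : Int) : List (List (Int × Int)) :=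
  match bboxes with
  | [] => []
  | b0 :: _ =>
    let st := (PySem.List.pyRange 1 (PySem.List.len bboxes)).foldl
      (fun (st : List (List (Int × Int)) × List (Int × Int)) i =>
        if |(PySem.List.pyGetD st.2 (-1) (0, 0)).1 - (PySem.List.pyGetD bboxes i (0, 0)).1| ≤ threshold then
          (st.1, st.2 ++ [PySem.List.pyGetD bboxes i (0, 0)])
        else
          (st.1 ++ [st.2], [PySem.List.pyGetD bboxes i (0, 0)]))
      ([], [b0])
    (st.1 ++ [st.2]).map (fun c => PySem.List.sorted c (fun co => co.2) false)

-- ===== PORT B =====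
-- literal port of B: boundary indices first, then slice at consecutive boundary pairs and sort each slice.
def cluster_bboxes_alt (bboxes : List (Int × Int)) (threshold : Int) : List (List (Int × Int)) :=
  let n : Int := PySem.List.len bboxes
  let cuts : List Int :=
    0 :: ((PySem.List.pyRange 1 n).filter
      (fun i => threshold < |(PySem.List.pyGetD bboxes i (0, 0)).1 - (PySem.List.pyGetD bboxes (i - 1) (0, 0)).1|) ++ [n])
  (cuts.zip cuts.tail).map
    (fun p => PySem.List.sorted (PySem.List.slice bboxes (some p.1) (some p.2)) (fun co => co.2) false)

-- ===== PRECONDITION & SPEC =====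
-- Pre_ excludes only the empty list, on which Python A raises IndexError (bboxes[0]).
def Pre_cluster_bboxes (bboxes : List (Int × Int)) (threshold : Int) : Prop := bboxes ≠ []
instance (bboxes : List (Int × Int)) (threshold : Int) : Decidable (Pre_cluster_bboxes bboxes threshold) := by unfold Pre_cluster_bboxes; infer_instance
def pvWitness_cluster_bboxes : (List (Int × Int)) × Int := ([(0, 2), (1, 1), (5, 0)], 1)

def Spec_cluster_bboxes (bboxes : List (Int × Int)) (threshold : Int) (out : List (List (Int × Int))) : Prop := out = cluster_bboxes_alt bboxes threshold
instance (bboxes : List (Int × Int)) (threshold : Int) (out : List (List (Int × Int))) : Decidable (Spec_cluster_bboxes bboxes threshold out) := by unfold Spec_cluster_bboxes; infer_instance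

-- ===== CLAIM (what is proved, stated in full; the proofs are below) =====
def Claim_equal_cluster_bboxes : Prop := ∀ (bboxes : List (Int × Int)) (threshold : Int), Dom_cluster_bboxes bboxes threshold → Pre_cluster_bboxes bboxes threshold → Spec_cluster_bboxes bboxes threshold (cluster_bboxes bboxes threshold)

-- ===== LEMMAS AND PROOFS =====

-- the clustering both programs compute, as a structural recursion (proof-side reference)
def segs (t : Int) (x : Int × Int) : List (Int × Int) → List (List (Int × Int))
  | [] => [[x]]
  | y :: ys =>
    if |x.1 - y.1| ≤ t then
      match segs t y ys with
      | [] => [[x]]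
      | s :: ss => (x :: s) :: ss
    else [x] :: segs t y ys

lemma segs_ne_nil (t : Int) (x : Int × Int) (l : List (Int × Int)) : segs t x l ≠ [] := by
  cases l with
  | nil => simp [segs]
  | cons y ys =>
    simp only [segs]
    split
    · cases h : segs t y ys <;> simp
    · simp

def consHead (pre : List (Int × Int)) : List (List (Int × Int)) → List (List (Int × Int))
  | [] => [pre]
  | s :: ss => (pre ++ s) :: ss

-- A-side loop invariant: clusters ++ [curr_cluster] tracks segs, with `pre` the already-merged part of the head segment
lemma loopA (t : Int) : ∀ (rest : List (Int × Int)) (clusters : List (List (Int × Int)))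
    (pre : List (Int × Int)) (x : Int × Int),
    (rest.foldl
      (fun (st : List (List (Int × Int)) × List (Int × Int)) bi =>
        if |(PySem.List.pyGetD st.2 (-1) (0, 0)).1 - bi.1| ≤ t then
          (st.1, st.2 ++ [bi])
        else
          (st.1 ++ [st.2], [bi]))
      (clusters, pre ++ [x])).1 ++
    [(rest.foldl
      (fun (st : List (List (Int × Int)) × List (Int × Int)) bi =>
        if |(PySem.List.pyGetD st.2 (-1) (0, 0)).1 - bi.1| ≤ t then
          (st.1, st.2 ++ [bi])
        else
          (st.1 ++ [st.2], [bi]))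
      (clusters, pre ++ [x])).2] = clusters ++ consHead pre (segs t x rest) := by
  intro rest
  induction rest with
  | nil => intro clusters pre x; simp [segs, consHead]
  | cons y ys ih =>
    intro clusters pre x
    simp only [List.foldl_cons, PySem.List.pyGetD_neg_one_append_singleton]
    by_cases h : |x.1 - y.1| ≤ t
    · rw [if_pos h]
      rw [ih clusters (pre ++ [x]) y]
      simp only [segs, if_pos h]
      cases hs : segs t y ys with
      | nil => exact absurd hs (segs_ne_nil t y ys)
      | cons s ss => simp [consHead]
    · rw [if_neg h]
      have := ih (clusters ++ [pre ++ [x]]) [] y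
      rw [List.nil_append] at this
      rw [this]
      simp only [segs, if_neg h]
      cases hs : segs t y ys with
      | nil => exact absurd hs (segs_ne_nil t y ys)
      | cons s ss => simp [consHead]

lemma portA_eq_segs (b0 : Int × Int) (rest : List (Int × Int)) (t : Int) :
    cluster_bboxes (b0 :: rest) t
      = (segs t b0 rest).map (fun c => PySem.List.sorted c (fun co => co.2) false) := by
  simp only [cluster_bboxes]
  rw [PySem.List.foldl_pyRange_pyGetD (b0 :: rest) (0, 0)
    (fun (st : List (List (Int × Int)) × List (Int × Int)) bi =>
      if |(PySem.List.pyGetD st.2 (-1) (0, 0)).1 - bi.1| ≤ t then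
        (st.1, st.2 ++ [bi])
      else
        (st.1 ++ [st.2], [bi])) ([], [b0]) (by norm_num)]
  simp only [Int.toNat_one, List.drop_succ_cons, List.drop_zero]
  have h := loopA t rest [] [] b0
  rw [List.nil_append] at h
  rw [h, List.nil_append]
  cases hs : segs t b0 rest with
  | nil => exact absurd hs (segs_ne_nil t b0 rest)
  | cons s ss => simp [consHead]

-- B-side: the cut indices, recursively (k = index of x in the full list)
def cutsAux (t : Int) (k : Nat) (x : Int × Int) : List (Int × Int) → List Nat
  | [] => []
  | y :: ys => if t < |y.1 - x.1| then (k + 1) :: cutsAux t (k + 1) y ys else cutsAux t (k + 1) y ys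

lemma cutsAux_filter (t : Int) : ∀ (rest front : List (Int × Int)) (x : Int × Int)
    (xs : List (Int × Int)), xs = front ++ x :: rest →
    (PySem.List.pyRange ((front.length : Int) + 1) (PySem.List.len xs)).filter
      (fun i => t < |(PySem.List.pyGetD xs i (0, 0)).1 - (PySem.List.pyGetD xs (i - 1) (0, 0)).1|)
    = (cutsAux t front.length x rest).map (fun k : Nat => (k : Int)) := by
  intro rest
  induction rest with
  | nil =>
    intro front x xs hxs
    subst hxs
    rw [PySem.List.pyRange_one_eq_nil (by simp [PySem.List.len_eq])]
    simp [cutsAux]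
  | cons y ys ih =>
    intro front x xs hxs
    have hlt : (front.length : Int) + 1 < PySem.List.len xs := by
      rw [hxs, PySem.List.len_eq]
      simp only [List.length_append, List.length_cons]
      push_cast; omega
    rw [PySem.List.pyRange_one_cons hlt, List.filter_cons]
    have hy : PySem.List.pyGetD xs ((front.length : Int) + 1) (0, 0) = y := by
      rw [hxs, show ((front.length : Int) + 1) = ((front.length + 1 : Nat) : Int) by push_cast; ring,
        PySem.List.pyGetD_natCast]
      simp [List.getD_eq_getElem?_getD]
    have hx : PySem.List.pyGetD xs ((front.length : Int) + 1 - 1) (0, 0) = x := by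
      rw [hxs, show ((front.length : Int) + 1 - 1) = ((front.length : Nat) : Int) by ring,
        PySem.List.pyGetD_natCast]
      simp [List.getD_eq_getElem?_getD]
    have hih := ih (front ++ [x]) y xs (by simp [hxs])
    have hlen : (front ++ [x]).length = front.length + 1 := by simp
    rw [hlen] at hih
    have hrange : ((front.length : Int) + 1) + 1 = ((front.length + 1 : Nat) : Int) + 1 := by
      push_cast; ring
    rw [hy, hx, hrange, hih]
    simp only [cutsAux]
    by_cases h : t < |y.1 - x.1|
    · simp [h]
    · simp [h]

-- the segments cut out of xs by a list of cut positions
def segsFromCuts (xs : List (Int × Int)) : List Nat → List (List (Int × Int))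
  | [] => []
  | [_] => []
  | a :: b :: cs => ((xs.drop a).take (b - a)) :: segsFromCuts xs (b :: cs)

lemma cutsAux_lb (t : Int) : ∀ (rest : List (Int × Int)) (k : Nat) (x : Int × Int)
    (c : Nat), c ∈ cutsAux t k x rest → k + 1 ≤ c := by
  intro rest
  induction rest with
  | nil => intro k x c hc; simp [cutsAux] at hc
  | cons y ys ih =>
    intro k x c hc
    simp only [cutsAux] at hc
    split at hc
    · rcases List.mem_cons.mp hc with h | h
      · omega
      · have := ih (k + 1) y c h; omega
    · have := ih (k + 1) y c hc; omega

lemma segsFromCuts_eq_segs (t : Int) : ∀ (rest : List (Int × Int)) (m : Nat) (x : Int × Int)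
    (xs : List (Int × Int)), xs.drop m = x :: rest →
    segsFromCuts xs (m :: (cutsAux t m x rest ++ [xs.length])) = segs t x rest := by
  intro rest
  induction rest with
  | nil =>
    intro m x xs hd
    have hm : m < xs.length := by
      by_contra hh
      rw [List.drop_eq_nil_of_le (by omega)] at hd
      exact absurd hd (by simp)
    have hlen : xs.length = m + 1 := by
      have := congrArg List.length hd
      simp only [List.length_drop, List.length_cons, List.length_nil] at this
      omega
    simp [cutsAux, segsFromCuts, hlen, hd, segs]
  | cons y ys ih =>
    intro m x xs hd
    have hm : m < xs.length := by
      by_contra hh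
      rw [List.drop_eq_nil_of_le (by omega)] at hd
      exact absurd hd (by simp)
    have hlen : xs.length = m + 2 + ys.length := by
      have := congrArg List.length hd
      simp only [List.length_drop, List.length_cons] at this
      omega
    have hd1 : xs.drop (m + 1) = y :: ys := by
      have h1 := congrArg (List.drop 1) hd
      simpa [List.drop_drop, Nat.add_comm] using h1
    have hx2 : xs.drop m = x :: xs.drop (m + 1) := by rw [hd, hd1]
    have hih := ih (m + 1) y xs hd1
    by_cases h : |x.1 - y.1| ≤ t
    · -- no cut between x and y: the head segment extends by x
      have hnc : ¬ t < |y.1 - x.1| := by rw [abs_sub_comm]; omega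
      rw [show cutsAux t m x (y :: ys) = cutsAux t (m + 1) y ys by simp [cutsAux, hnc]]
      simp only [segs]
      rw [if_pos h]
      cases hcs : cutsAux t (m + 1) y ys ++ [xs.length] with
      | nil => simp at hcs
      | cons c cs =>
        have hc : m + 1 ≤ c := by
          rcases List.mem_append.mp (hcs ▸ List.mem_cons_self) with hm' | hm'
          · have := cutsAux_lb t ys (m + 1) y c hm'; omega
          · have hceq : c = xs.length := by simpa using hm'
            omega
        rw [hcs] at hih
        simp only [segsFromCuts] at hih ⊢
        cases hsegs : segs t y ys with
        | nil => exact absurd hsegs (segs_ne_nil t y ys)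
        | cons s ss =>
          rw [hsegs] at hih
          injection hih with h1 h2
          show _ = (x :: s) :: ss
          rw [hx2, show c - m = (c - (m + 1)) + 1 by omega, List.take_succ_cons, h1, h2]
    · -- cut between x and y: the head segment is exactly [x]
      have hc2 : t < |y.1 - x.1| := by rw [abs_sub_comm]; omega
      rw [show cutsAux t m x (y :: ys) = (m + 1) :: cutsAux t (m + 1) y ys by simp [cutsAux, hc2]]
      simp only [List.cons_append, segsFromCuts]
      simp only [segs]
      rw [if_neg h, ← hih]
      congr 1
      rw [hx2, show m + 1 - m = 1 by omega]
      simp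

-- zip of consecutive cut pairs = segsFromCuts, with the sort applied to each slice
lemma zipSlices (xs : List (Int × Int)) : ∀ (cs : List Nat),
    (((cs.map (fun k : Nat => (k : Int))).zip (cs.map (fun k : Nat => (k : Int))).tail).map
      (fun p => PySem.List.sorted (PySem.List.slice xs (some p.1) (some p.2)) (fun co => co.2) false))
    = (segsFromCuts xs cs).map (fun c => PySem.List.sorted c (fun co => co.2) false) := by
  intro cs
  induction cs with
  | nil => simp [segsFromCuts]
  | cons a tail ih =>
    cases tail with
    | nil => simp [segsFromCuts]
    | cons b cs' =>
      simp only [List.map_cons, List.tail_cons, List.zip_cons_cons, segsFromCuts] at ih ⊢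
      rw [PySem.List.slice_natCast]
      exact congrArg _ ih

lemma portB_eq_segs (b0 : Int × Int) (rest : List (Int × Int)) (t : Int) :
    cluster_bboxes_alt (b0 :: rest) t
      = (segs t b0 rest).map (fun c => PySem.List.sorted c (fun co => co.2) false) := by
  simp only [cluster_bboxes_alt]
  have hf := cutsAux_filter t rest [] b0 (b0 :: rest) rfl
  simp only [List.length_nil, Nat.cast_zero, zero_add] at hf
  rw [hf]
  have h0 : (0 : Int) :: ((cutsAux t 0 b0 rest).map (fun k : Nat => (k : Int)) ++ [PySem.List.len (b0 :: rest)])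
      = (((0 : Nat) :: (cutsAux t 0 b0 rest ++ [(b0 :: rest).length])).map (fun k : Nat => (k : Int))) := by
    simp [PySem.List.len_eq]
  rw [h0, zipSlices]
  rw [segsFromCuts_eq_segs t rest 0 b0 (b0 :: rest) (by simp)]

-- ===== VERDICT (by name: the statement is the Claim_ definition above) =====
theorem cluster_bboxes_spec : Claim_equal_cluster_bboxes := by
  intro bboxes t _ hpre
  unfold Spec_cluster_bboxes
  cases bboxes with
  | nil => exact absurd rfl hpre
  | cons b0 rest => rw [portA_eq_segs, portB_eq_segs]
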